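-- pv_equiv track=rewrite | github.com/BarryZM/Workspace-of-NLU | solutions/d_semantic/similarity/02-Demo/01-FeatureExtract.py | get_word_pinyin_variant_list
-- ===== SOURCE A (Python) =====
-- def get_word_pinyin_variant_list(input_text, sim_pinyin_dict):
--     """
--     get variant word of input
--     :param input_word:
--     :param sim_pinyin_dict:
--     :return:
--     """
--     word_variant_list = []
--
--     key_set = sim_pinyin_dict.keys()
--     for single_key in key_set:  # 遍历所有模糊词
--         if single_key in input_text:
--             values = sim_pinyin_dict[single_key]  # 当前模糊词的变体
--             for item_value in values:  # 遍历所有变体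
--                 tmp = input_text.replace(single_key, item_value)  # 将当前模糊词替换为变体
--                 word_variant_list.append(tmp)  # 返回变化后字符串
--
--     return word_variant_list
-- ===== SOURCE B (Python) =====
-- def get_word_pinyin_variant_list(input_text, sim_pinyin_dict):
--     # Phase 1: discover which fuzzy keys occur at all by scanning the TEXT once,
--     # probing a hash set of keys with the substring starting at each position for
--     # each distinct key length (no per-key substring scan of the text).
--     key_set = set(sim_pinyin_dict)
--     lengths = sorted({len(k) for k in key_set})
--     n = len(input_text)
--     present = set()
--     for i in range(n + 1):
--         for L in lengths:
--             if i + L <= n: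
--                 sub = input_text[i:i + L]
--                 if sub in key_set:
--                     present.add(sub)
--     # Phase 2: emit the variants, in dict order, for the keys found present.
--     word_variant_list = []
--     for key, values in sim_pinyin_dict.items():
--         if key in present:
--             for value in values:
--                 word_variant_list.append(input_text.replace(key, value))
--     return word_variant_list
-- ===== Notes on version B (the rewrite author's own statement) =====
-- stated objective: alternative
-- what changed: B inverts the search: instead of A's per-key 'key in input_text' substring scan, it makes one pass over the text positions probing a hash set of keys with the substring of each distinct key length, collecting the set of present keys, and only then emits the replacements in dict order.
import Mathlib
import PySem

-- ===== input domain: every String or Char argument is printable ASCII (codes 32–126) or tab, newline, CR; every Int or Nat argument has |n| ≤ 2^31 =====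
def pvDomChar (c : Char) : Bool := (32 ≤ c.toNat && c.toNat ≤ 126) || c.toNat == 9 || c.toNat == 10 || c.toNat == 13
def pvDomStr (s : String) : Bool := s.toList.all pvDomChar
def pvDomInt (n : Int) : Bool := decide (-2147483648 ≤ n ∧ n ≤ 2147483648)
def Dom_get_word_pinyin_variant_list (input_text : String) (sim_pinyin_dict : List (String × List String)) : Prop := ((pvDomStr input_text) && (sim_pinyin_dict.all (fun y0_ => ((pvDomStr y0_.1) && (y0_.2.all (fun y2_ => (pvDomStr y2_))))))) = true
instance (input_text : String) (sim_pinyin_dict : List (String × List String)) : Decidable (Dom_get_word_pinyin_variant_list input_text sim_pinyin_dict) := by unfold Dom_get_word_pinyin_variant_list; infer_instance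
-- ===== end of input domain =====

-- B inverts the search: one pass over the text positions probing a hash set of keys
-- (one probe per position and distinct key length) finds the set of present keys,
-- then the variants are emitted in dict order — instead of A's per-key substring scan.

-- ===== PORT A =====
-- the Python dict argument arrives as an association list; PySem.Dict.ofList is dict(pairs)
def get_word_pinyin_variant_list (input_text : String) (sim_pinyin_dict : List (String × List String)) : List String :=
  let d := PySem.Dict.ofList sim_pinyin_dict
  d.keys.foldl
    (fun word_variant_list single_key =>
      if PySem.Str.isIn single_key input_text then
        -- sim_pinyin_dict[single_key]: the key comes from the dict's keys, so it is
        -- present and the default [] of getD is never used (exact for Python's d[k])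
        (d.getD single_key []).foldl
          (fun acc item_value => acc ++ [PySem.Str.replace input_text single_key item_value])
          word_variant_list
      else word_variant_list)
    []

-- ===== PORT B =====
def get_word_pinyin_variant_list_alt (input_text : String) (sim_pinyin_dict : List (String × List String)) : List String :=
  let d := PySem.Dict.ofList sim_pinyin_dict
  let key_set : PySem.Set String := PySem.Set.ofList d.keys
  let lengths : List Int :=
    PySem.List.sorted (PySem.Set.ofList (key_set.map (fun k => PySem.Str.len k))) (fun x => x) false
  let n : Int := PySem.Str.len input_text
  let present : PySem.Set String :=
    (PySem.List.pyRange 0 (n + 1)).foldl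
      (fun pres i =>
        lengths.foldl
          (fun pres L =>
            if i + L ≤ n then
              let sub := PySem.Str.slice input_text (some i) (some (i + L))
              if PySem.Set.contains key_set sub then PySem.Set.add pres sub else pres
            else pres)
          pres)
      PySem.Set.empty
  d.items.foldl
    (fun word_variant_list kv =>
      if PySem.Set.contains present kv.1 then
        kv.2.foldl
          (fun acc value => acc ++ [PySem.Str.replace input_text kv.1 value])
          word_variant_list
      else word_variant_list)
    []

-- ===== PRECONDITION & SPEC =====
def Spec_get_word_pinyin_variant_list (input_text : String) (sim_pinyin_dict : List (String × List String)) (out : List String) : Prop := out = get_word_pinyin_variant_list_alt input_text sim_pinyin_dict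
instance (input_text : String) (sim_pinyin_dict : List (String × List String)) (out : List String) : Decidable (Spec_get_word_pinyin_variant_list input_text sim_pinyin_dict out) := by unfold Spec_get_word_pinyin_variant_list; infer_instance

-- ===== CLAIM (what is proved, stated in full; the proofs are below) =====
def Claim_equal_get_word_pinyin_variant_list : Prop := ∀ (input_text : String) (sim_pinyin_dict : List (String × List String)), Dom_get_word_pinyin_variant_list input_text sim_pinyin_dict → Spec_get_word_pinyin_variant_list input_text sim_pinyin_dict (get_word_pinyin_variant_list input_text sim_pinyin_dict)

-- ===== LEMMAS AND PROOFS =====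

-- membership in the inner (per-position) probe loop of B
theorem pv_mem_inner (text : String) (ks : PySem.Set String) (i : Int) (Ls : List Int) :
    ∀ (pres : PySem.Set String) (x : String),
    (x ∈ Ls.foldl
        (fun pres L =>
          if i + L ≤ PySem.Str.len text then
            if PySem.Set.contains ks (PySem.Str.slice text (some i) (some (i + L))) then
              PySem.Set.add pres (PySem.Str.slice text (some i) (some (i + L)))
            else pres
          else pres)
        pres)
    ↔ x ∈ pres ∨ ∃ L ∈ Ls, i + L ≤ PySem.Str.len text ∧
        PySem.Set.contains ks (PySem.Str.slice text (some i) (some (i + L))) = true ∧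
        PySem.Str.slice text (some i) (some (i + L)) = x := by
  induction Ls with
  | nil => intro pres x; simp
  | cons L t ih =>
    intro pres x
    simp only [List.foldl_cons]
    rw [ih]
    split_ifs with h1 h2
    · rw [PySem.Set.mem_add]
      constructor
      · rintro (( h | rfl) | h)
        · exact Or.inl h
        · exact Or.inr ⟨L, by simp, h1, h2, rfl⟩
        · obtain ⟨L', hL', h⟩ := h; exact Or.inr ⟨L', by simp [hL'], h⟩
      · rintro (h | ⟨L', hL', hc⟩)
        · exact Or.inl (Or.inl h)
        · rcases List.mem_cons.mp hL' with rfl | hL'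
          · exact Or.inl (Or.inr hc.2.2.symm)
          · exact Or.inr ⟨L', hL', hc⟩
    · constructor
      · rintro (h | ⟨L', hL', hc⟩)
        · exact Or.inl h
        · exact Or.inr ⟨L', by simp [hL'], hc⟩
      · rintro (h | ⟨L', hL', hc⟩)
        · exact Or.inl h
        · rcases List.mem_cons.mp hL' with rfl | hL'
          · exact absurd hc.2.1 h2
          · exact Or.inr ⟨L', hL', hc⟩
    · constructor
      · rintro (h | ⟨L', hL', hc⟩)
        · exact Or.inl h
        · exact Or.inr ⟨L', by simp [hL'], hc⟩
      · rintro (h | ⟨L', hL', hc⟩)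
        · exact Or.inl h
        · rcases List.mem_cons.mp hL' with rfl | hL'
          · exact absurd hc.1 h1
          · exact Or.inr ⟨L', hL', hc⟩

-- membership in the whole scan of B
theorem pv_mem_outer (text : String) (ks : PySem.Set String) (Ls : List Int) (Is : List Int) :
    ∀ (pres : PySem.Set String) (x : String),
    (x ∈ Is.foldl
        (fun pres i =>
          Ls.foldl
            (fun pres L =>
              if i + L ≤ PySem.Str.len text then
                let sub := PySem.Str.slice text (some i) (some (i + L))
                if PySem.Set.contains ks sub then PySem.Set.add pres sub else pres
              else pres)
            pres)
        pres)
    ↔ x ∈ pres ∨ ∃ i ∈ Is, ∃ L ∈ Ls, i + L ≤ PySem.Str.len text ∧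
        PySem.Set.contains ks (PySem.Str.slice text (some i) (some (i + L))) = true ∧
        PySem.Str.slice text (some i) (some (i + L)) = x := by
  induction Is with
  | nil => intro pres x; simp
  | cons i t ih =>
    intro pres x
    simp only [List.foldl_cons]
    rw [ih, pv_mem_inner]
    constructor
    · rintro ((h | ⟨L, hL, hc⟩) | ⟨i', hi', h⟩)
      · exact Or.inl h
      · exact Or.inr ⟨i, by simp, L, hL, hc⟩
      · exact Or.inr ⟨i', by simp [hi'], h⟩
    · rintro (h | ⟨i', hi', h⟩)
      · exact Or.inl (Or.inl h)
      · rcases List.mem_cons.mp hi' with rfl | hi'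
        · exact Or.inl (Or.inr h)
        · exact Or.inr ⟨i', hi', h⟩

-- a slice with nonnegative bounds is an infix of the text
theorem pv_slice_infix (text : String) {i L : Int} (hi : 0 ≤ i) (hL : 0 ≤ L) :
    (PySem.Str.slice text (some i) (some (i + L))).toList <:+: text.toList := by
  rw [PySem.Str.toList_slice, PySem.Chars.slice_eq_listSlice,
      PySem.List.slice_toNat text.toList hi (by omega)]
  exact ((List.take_prefix _ _).isInfix).trans ((List.drop_suffix _ _).isInfix)

-- for a key of the dict, B's 'present' set test agrees with A's substring test
theorem pv_contains_present (text : String) (keys : List String) (k : String) (hk : k ∈ keys) :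
    PySem.Set.contains
      ((PySem.List.pyRange 0 (PySem.Str.len text + 1)).foldl
        (fun pres i =>
          (PySem.List.sorted
              (PySem.Set.ofList ((PySem.Set.ofList keys).map (fun k => PySem.Str.len k)))
              (fun x => x) false).foldl
            (fun pres L =>
              if i + L ≤ PySem.Str.len text then
                if PySem.Set.contains (PySem.Set.ofList keys)
                    (PySem.Str.slice text (some i) (some (i + L))) then
                  PySem.Set.add pres (PySem.Str.slice text (some i) (some (i + L)))
                else pres
              else pres)
            pres)
        PySem.Set.empty) k
    = PySem.Str.isIn k text := by
  have hlen_nonneg : ∀ L ∈ PySem.List.sorted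
      (PySem.Set.ofList ((PySem.Set.ofList keys).map (fun k => PySem.Str.len k)))
      (fun x => x) false, 0 ≤ L := by
    intro L hL
    have := (PySem.List.sorted_perm _ _ _).mem_iff.mp hL
    rw [PySem.Set.mem_ofList] at this
    obtain ⟨k', _, rfl⟩ := List.mem_map.mp this
    rw [PySem.Str.len_eq]; positivity
  by_cases hin : PySem.Str.isIn k text = true
  · rw [hin]
    rw [PySem.Set.contains_iff, pv_mem_outer]
    right
    obtain ⟨a, c, hac⟩ := (PySem.Str.isIn_iff_infix k text).mp hin
    have hslice : PySem.Str.slice text (some (a.length : Int))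
        (some ((a.length : Int) + PySem.Str.len k)) = k := by
      apply String.toList_inj.mp
      rw [PySem.Str.toList_slice, PySem.Chars.slice_eq_listSlice, PySem.Str.len_eq]
      have hcast : (a.length : Int) + (k.toList.length : Int)
          = ((a.length + k.toList.length : Nat) : Int) := by push_cast; ring
      rw [hcast, PySem.List.slice_natCast]
      rw [← hac]
      simp
    refine ⟨(a.length : Int), ?_, PySem.Str.len k, ?_, ?_, ?_, ?_⟩
    · rw [PySem.List.mem_pyRange_one]
      constructor
      · positivity
      · rw [PySem.Str.len_eq]
        have : a.length ≤ text.toList.length := by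
          rw [← hac]; simp
        omega
    · rw [(PySem.List.sorted_perm _ _ _).mem_iff, PySem.Set.mem_ofList]
      exact List.mem_map.mpr ⟨k, PySem.Set.mem_ofList keys k |>.mpr hk, rfl⟩
    · rw [PySem.Str.len_eq, PySem.Str.len_eq]
      have : a.length + k.toList.length ≤ text.toList.length := by
        rw [← hac]; simp
      omega
    · rw [hslice]
      exact PySem.Set.contains_iff _ _ |>.mpr (PySem.Set.mem_ofList keys k |>.mpr hk)
    · exact hslice
  · rw [Bool.not_eq_true] at hin
    rw [hin]
    rw [Bool.eq_false_iff]
    intro hc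
    rw [PySem.Set.contains_iff, pv_mem_outer] at hc
    rcases hc with h | ⟨i, hi, L, hL, hiL, _, hsl⟩
    · simp [PySem.Set.empty] at h
    · have hi0 : 0 ≤ i := (PySem.List.mem_pyRange_one.mp hi).1
      have hL0 : 0 ≤ L := hlen_nonneg L hL
      have : k.toList <:+: text.toList := by
        rw [← hsl]; exact pv_slice_infix text hi0 hL0
      rw [← PySem.Str.isIn_iff_infix] at this
      rw [hin] at this
      exact Bool.false_ne_true this

-- ===== VERDICT (by name: the statement is the Claim_ definition above) =====
theorem get_word_pinyin_variant_list_spec : Claim_equal_get_word_pinyin_variant_list := by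
  intro input_text sim_pinyin_dict _hdom
  unfold Spec_get_word_pinyin_variant_list
  unfold get_word_pinyin_variant_list get_word_pinyin_variant_list_alt
  simp only []
  have hkeys : (PySem.Dict.ofList sim_pinyin_dict).keys =
      (PySem.Dict.ofList sim_pinyin_dict).items.map Prod.fst := rfl
  rw [hkeys, List.foldl_map]
  apply PySem.List.foldl_congr_mem
  intro acc kv hmem
  have hval : (PySem.Dict.ofList sim_pinyin_dict).getD kv.1 [] = kv.2 :=
    PySem.Dict.getD_of_mem_items _ (by simpa using hmem)
      (PySem.Dict.nodup_keys_ofList sim_pinyin_dict) []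
  rw [hval]
  have hkmem : kv.1 ∈ (PySem.Dict.ofList sim_pinyin_dict).items.map Prod.fst :=
    List.mem_map.mpr ⟨kv, hmem, rfl⟩
  rw [pv_contains_present input_text ((PySem.Dict.ofList sim_pinyin_dict).items.map Prod.fst) kv.1 hkmem]
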